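-- pv_equiv track=rewrite | github.com/pedromouzinho/dbde_ai_assistant | tools_upload.py | _select_tabular_row
-- ===== SOURCE A (Python) =====
-- def _select_tabular_row(rows: list[dict], filename: str = "") -> dict | None:
--     candidates = []
--     wanted = str(filename or "").strip().lower()
--     for row in rows:
--         fname = str(row.get("Filename", "") or "")
--         lower = fname.lower()
--         if not lower.endswith((".csv", ".xlsx", ".xls")):
--             continue
--         if wanted and wanted not in lower:
--             continue
--         candidates.append(row)
--     if candidates:
--         return candidates[-1]
--     if wanted:
--         return None
--     fallback = [r for r in rows if str(r.get("Filename", "") or "").lower().endswith((".csv", ".xlsx", ".xls"))]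
--     return fallback[-1] if fallback else None
-- ===== SOURCE B (Python) =====
-- def _select_tabular_row(rows: list[dict], filename: str = "") -> dict | None:
--     wanted = str(filename or "").strip().lower()
--     for row in reversed(rows):
--         lower = str(row.get("Filename", "") or "").lower()
--         if lower.endswith((".csv", ".xlsx", ".xls")) and (not wanted or wanted in lower):
--             return row
--     return None
-- ===== Notes on version B (the rewrite author's own statement) =====
-- stated objective: simpler
-- what changed: Replaces the candidates-accumulator scan plus separate fallback list-comprehension with a single reversed-order scan that returns the first matching row; the fallback branch is dropped because for an empty filter it selects from exactly the same set.
import Mathlib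
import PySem

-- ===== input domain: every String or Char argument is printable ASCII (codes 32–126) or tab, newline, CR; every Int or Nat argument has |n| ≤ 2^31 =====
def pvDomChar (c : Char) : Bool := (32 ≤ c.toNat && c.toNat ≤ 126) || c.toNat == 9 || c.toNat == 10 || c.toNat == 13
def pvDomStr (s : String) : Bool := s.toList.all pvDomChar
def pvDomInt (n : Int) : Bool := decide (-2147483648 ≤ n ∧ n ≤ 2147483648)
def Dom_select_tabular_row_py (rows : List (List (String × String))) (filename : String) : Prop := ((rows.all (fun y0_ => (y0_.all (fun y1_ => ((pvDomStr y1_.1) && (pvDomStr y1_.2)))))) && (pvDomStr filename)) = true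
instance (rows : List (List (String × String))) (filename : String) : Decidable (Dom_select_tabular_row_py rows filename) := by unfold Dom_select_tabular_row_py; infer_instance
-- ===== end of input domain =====

-- B replaces A's candidates-accumulator pass plus separate fallback comprehension by one
-- reversed-order scan returning the first matching row (objective: simpler).


-- ===== PORT A =====
-- lower = str(row.get("Filename","") or "").lower()  ('or ""' is the identity on strings)
def pvLowerFname (row : List (String × String)) : String :=
  PySem.Str.lower ((PySem.Dict.mk row).getD "Filename" "")

-- lower.endswith((".csv", ".xlsx", ".xls"))
def pvEndsTab (lower : String) : Bool :=
  PySem.Str.endswith lower ".csv" || PySem.Str.endswith lower ".xlsx" || PySem.Str.endswith lower ".xls"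

def select_tabular_row_py (rows : List (List (String × String))) (filename : String) : Option (List (String × String)) :=
  let wanted := PySem.Str.lower (PySem.Str.strip filename)  -- str(filename or "").strip().lower()
  let candidates := rows.foldl (fun acc row =>
    let lower := pvLowerFname row
    if !(pvEndsTab lower) then acc          -- continue
    else if wanted ≠ "" ∧ ¬ PySem.Str.isIn wanted lower then acc  -- continue
    else acc ++ [row]) []
  if candidates ≠ [] then PySem.List.pyGet? candidates (-1)   -- candidates[-1]
  else if wanted ≠ "" then none
  else
    let fallback := rows.filter (fun r => pvEndsTab (pvLowerFname r))
    if fallback ≠ [] then PySem.List.pyGet? fallback (-1) else none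

-- ===== PORT B =====
-- the reversed-loop body: return the first row (from the end) passing both checks
def pvAltGo (wanted : String) : List (List (String × String)) → Option (List (String × String))
  | [] => none
  | row :: rest =>
    let lower := PySem.Str.lower ((PySem.Dict.mk row).getD "Filename" "")
    if (PySem.Str.endswith lower ".csv" || PySem.Str.endswith lower ".xlsx" || PySem.Str.endswith lower ".xls")
        && (wanted == "" || PySem.Str.isIn wanted lower) then some row
    else pvAltGo wanted rest

def select_tabular_row_py_alt (rows : List (List (String × String))) (filename : String) : Option (List (String × String)) :=
  pvAltGo (PySem.Str.lower (PySem.Str.strip filename)) rows.reverse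

-- ===== PRECONDITION & SPEC =====
def Spec_select_tabular_row_py (rows : List (List (String × String))) (filename : String) (out : Option (List (String × String))) : Prop := out = select_tabular_row_py_alt rows filename
instance (rows : List (List (String × String))) (filename : String) (out : Option (List (String × String))) : Decidable (Spec_select_tabular_row_py rows filename out) := by unfold Spec_select_tabular_row_py; infer_instance

-- ===== CLAIM (what is proved, stated in full; the proofs are below) =====
def Claim_equal_select_tabular_row_py : Prop := ∀ (rows : List (List (String × String))) (filename : String), Dom_select_tabular_row_py rows filename → Spec_select_tabular_row_py rows filename (select_tabular_row_py rows filename)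

-- ===== LEMMAS AND PROOFS =====
-- the combined predicate both programs test
def pvP (wanted : String) (row : List (String × String)) : Bool :=
  pvEndsTab (pvLowerFname row) && (wanted == "" || PySem.Str.isIn wanted (pvLowerFname row))

theorem pvAltGo_eq_find? (wanted : String) (l : List (List (String × String))) :
    pvAltGo wanted l = l.find? (pvP wanted) := by
  induction l with
  | nil => rfl
  | cons row rest ih =>
    have h0 : pvAltGo wanted (row :: rest) =
        if pvP wanted row then some row else pvAltGo wanted rest := rfl
    rw [h0, List.find?_cons]
    cases hc : pvP wanted row <;> simp [ih]

theorem pvBody_eq (wanted : String) (acc : List (List (String × String))) (row : List (String × String)) :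
    (let lower := pvLowerFname row
     if !(pvEndsTab lower) then acc
     else if wanted ≠ "" ∧ ¬ PySem.Str.isIn wanted lower then acc
     else acc ++ [row]) = if pvP wanted row then acc ++ [row] else acc := by
  simp only [pvP]
  by_cases h1 : pvEndsTab (pvLowerFname row) <;>
    by_cases h2 : wanted = "" <;>
      by_cases h3 : PySem.Chars.isIn wanted.toList (pvLowerFname row).toList <;>
        simp [h1, h2, h3]

theorem pvFold_eq_filter (wanted : String) (l : List (List (String × String)))
    (acc : List (List (String × String))) :
    l.foldl (fun acc row =>
      let lower := pvLowerFname row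
      if !(pvEndsTab lower) then acc
      else if wanted ≠ "" ∧ ¬ PySem.Str.isIn wanted lower then acc
      else acc ++ [row]) acc = acc ++ l.filter (pvP wanted) := by
  have hb : (fun (acc : List (List (String × String))) row =>
      let lower := pvLowerFname row
      if !(pvEndsTab lower) then acc
      else if wanted ≠ "" ∧ ¬ PySem.Str.isIn wanted lower then acc
      else acc ++ [row]) = fun acc row => if pvP wanted row then acc ++ [row] else acc := by
    funext acc row; exact pvBody_eq wanted acc row
  rw [hb, PySem.List.foldl_append_if_eq_filter]

theorem head?_filter_eq_find? {α : Type} (p : α → Bool) (l : List α) :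
    (l.filter p).head? = l.find? p := by
  induction l with
  | nil => rfl
  | cons x xs ih => by_cases h : p x <;> simp [h, ih]

theorem pvGetLast?_eq_find?_reverse {α : Type} (p : α → Bool) (l : List α) :
    (l.filter p).getLast? = l.reverse.find? p := by
  rw [List.getLast?_eq_head?_reverse, ← List.filter_reverse, head?_filter_eq_find?]

theorem pyGet_neg_one {α : Type} (l : List α) (h : l ≠ []) :
    PySem.List.pyGet? l (-1) = l.getLast? := by
  have hl : 1 ≤ l.length := List.length_pos_iff.mpr h
  have h2 : l.length - 1 < l.length := by omega
  simp [PySem.List.pyGet?, PySem.List.pyIdx?, hl, List.getLast?_eq_getElem?,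
        List.getElem?_eq_getElem h2]
-- ===== VERDICT (by name: the statement is the Claim_ definition above) =====
theorem select_tabular_row_py_spec : Claim_equal_select_tabular_row_py := by
  intro rows filename _
  show select_tabular_row_py rows filename = select_tabular_row_py_alt rows filename
  simp only [select_tabular_row_py, select_tabular_row_py_alt]
  rw [pvAltGo_eq_find?, pvFold_eq_filter, List.nil_append,
      ← pvGetLast?_eq_find?_reverse (pvP (PySem.Str.lower (PySem.Str.strip filename))) rows]
  set wanted := PySem.Str.lower (PySem.Str.strip filename) with hwdef
  by_cases hc : rows.filter (pvP wanted) = []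
  · rw [hc]
    simp only [ne_eq, not_true_eq_false, if_false, List.getLast?_nil]
    by_cases hw : wanted = ""
    · rw [hw] at hc
      have hfb : rows.filter (fun r => pvEndsTab (pvLowerFname r)) = [] := by
        rw [← hc]
        apply List.filter_congr
        intro r _
        simp [pvP]
      simp [hw, hfb]
    · simp [hw]
  · simp [hc, pyGet_neg_one _ hc]
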